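-- pv_equiv track=rewrite | github.com/ShxLuo-Saxon/supermario-structure-annotation | pipeline/reformat_abc.py | split_into_bars
-- ===== SOURCE A (Python) =====
-- def split_into_bars(text):
--     # Split by bar delimiters.
--     # Delimiters: | || |] |: :| ::
--     # We want to keep the delimiters attached to the bar (at the end).
--
--     # Regex to split but keep delimiter.
--     # We ignore bars inside quoted strings (e.g. comments/annotations like "^|").
--     # This is complex. Simplified approach:
--     # 1. Hide quoted strings.
--     # 2. Split.
--     # 3. Restore.
--
--     # Regex for bar lines:
--     # We want to match [| or |] or || or |: or :| or :: or just |
--     # Longest match first.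
--     # Pattern: (::|:\||\|:|\|\||\|]|\[\||\|)
--
--     # But wait, we need to handle "text with | inside".
--     # Let's iterate through the string.
--
--     bars = []
--     current_bar = []
--     in_quote = False
--     i = 0
--     n = len(text)
--
--     while i < n:
--         char = text[i]
--
--         if char == '"':
--             in_quote = not in_quote
--             current_bar.append(char)
--             i += 1
--             continue
--
--         if not in_quote:
--             # Check for bar patterns starting at i
--             # Lookahead for max length 2 (::, ||, |], [|, |:, :|)
--
--             matched = False
--             for length in [2, 1]:
--                 if i + length <= n:
--                     sub = text[i:i+length]
--                     is_delim = False
--                     if length == 2: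
--                         if sub in ['::', ':|', '|:', '||', '|]', '[|']:
--                             is_delim = True
--                     elif length == 1:
--                         if sub == '|':
--                             is_delim = True
--
--                     if is_delim:
--                         # Found a delimiter.
--                         # If current_bar is empty, this is a barline at the start,
--                         # so include it as part of the first bar instead of creating an empty bar
--                         if current_bar:
--                             # Normal case: append delimiter and flush
--                             current_bar.append(sub)
--                             bars.append("".join(current_bar).strip())
--                             current_bar = []
--                         else:
--                             # Starting barline: include it in the next bar
--                             current_bar.append(sub)
--
--                         i += length
--                         matched = True
--                         break
--
--             if matched:
--                 continue
--
--         current_bar.append(char)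
--         i += 1
--
--     if current_bar:
--         rem = "".join(current_bar).strip()
--         if rem:
--             bars.append(rem)
--
--     # Filter out bars that contain only delimiters and no musical content
--     # A bar is empty if it only contains bar line symbols: | || |: :| :: |] [|
--     def has_music_content(bar):
--         # Remove all bar delimiters and whitespace
--         cleaned = bar.replace('|:', '').replace(':|', '').replace('::', '')
--         cleaned = cleaned.replace('||', '').replace('|]', '').replace('[|', '')
--         cleaned = cleaned.replace('|', '').strip()
--         return len(cleaned) > 0
--
--     # Keep bars that have music content (including those that start with barlines)
--     bars = [b for b in bars if has_music_content(b)]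
--
--     # Remove completely empty bars (only whitespace)
--     bars = [b.strip() for b in bars if b.strip()]
--
--     return bars
-- ===== SOURCE B (Python) =====
-- DELIMS2 = ('::', ':|', '|:', '||', '|]', '[|')
--
--
-- def _scan(seg, buf):
--     # Split one unquoted segment; returns (completed bars, leftover buffer).
--     out = []
--     j = 0
--     while j < len(seg):
--         if seg[j:j + 2] in DELIMS2:
--             d, j = seg[j:j + 2], j + 2
--         elif seg[j] == '|':
--             d, j = '|', j + 1
--         else:
--             buf += seg[j]
--             j += 1
--             continue
--         if buf:
--             out.append((buf + d).strip())
--             buf = ''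
--         else:
--             buf = d
--     return out, buf
--
--
-- def _has_music_content(bar):
--     cleaned = bar.replace('|:', '').replace(':|', '').replace('::', '')
--     cleaned = cleaned.replace('||', '').replace('|]', '').replace('[|', '')
--     cleaned = cleaned.replace('|', '').strip()
--     return len(cleaned) > 0
--
--
-- def split_into_bars(text):
--     # Quoted strings never contain bar delimiters: split the text on '"' so the
--     # segments alternate outside/inside quotes, and only scan the outside ones.
--     first, *rest = text.split('"')
--     bars, buf = _scan(first, '')
--     inside = True
--     for seg in rest:
--         if inside:
--             buf += '"' + seg
--         else:
--             new, buf = _scan(seg, buf + '"')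
--             bars.extend(new)
--         inside = not inside
--     if buf:
--         rem = buf.strip()
--         if rem:
--             bars.append(rem)
--     bars = [b for b in bars if _has_music_content(b)]
--     return [b.strip() for b in bars if b.strip()]
-- ===== Notes on version B (the rewrite author's own statement) =====
-- stated objective: alternative
-- what changed: B splits the text at quote characters once so segments alternate outside/inside quotes and only scans the unquoted segments for barlines with a string buffer, replacing A's single character-by-character loop with an in_quote flag, a piece-list buffer and a [2,1]-length lookahead loop.
import Mathlib
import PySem

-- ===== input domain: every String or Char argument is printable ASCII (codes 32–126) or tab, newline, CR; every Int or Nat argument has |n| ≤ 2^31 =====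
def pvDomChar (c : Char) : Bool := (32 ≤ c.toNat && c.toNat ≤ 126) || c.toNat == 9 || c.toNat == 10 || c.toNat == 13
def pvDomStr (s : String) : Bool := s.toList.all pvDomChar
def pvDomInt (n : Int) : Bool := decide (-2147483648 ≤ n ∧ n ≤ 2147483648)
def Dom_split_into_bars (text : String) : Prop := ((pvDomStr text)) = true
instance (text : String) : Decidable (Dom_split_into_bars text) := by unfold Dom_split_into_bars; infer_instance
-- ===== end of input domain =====

-- B splits the text at quote characters once and only scans the unquoted segments for barlines,
-- instead of A's single char-by-char loop with an in_quote flag (objective: alternative).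

-- helpers shared by both ports (both Python sources carry this code verbatim):
-- the 2-char delimiter set, the post-loop remainder step and the two filter passes.
def pvDelim2 (s : List Char) : Bool :=
  s == [':', ':'] || s == [':', '|'] || s == ['|', ':'] || s == ['|', '|'] ||
    s == ['|', ']'] || s == ['[', '|']

def pvRem (cur : List Char) (bars : List (List Char)) : List (List Char) :=
  if cur ≠ [] then
    let rem := PySem.Chars.strip cur
    if rem ≠ [] then bars ++ [rem] else bars
  else bars

def pvHasMusic (bar : List Char) : Bool :=
  let c := PySem.Chars.replace bar ['|', ':'] []
  let c := PySem.Chars.replace c [':', '|'] []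
  let c := PySem.Chars.replace c [':', ':'] []
  let c := PySem.Chars.replace c ['|', '|'] []
  let c := PySem.Chars.replace c ['|', ']'] []
  let c := PySem.Chars.replace c ['[', '|'] []
  let c := PySem.Chars.strip (PySem.Chars.replace c ['|'] [])
  decide (0 < c.length)

def pvFinish (bars : List (List Char)) : List String :=
  let bars1 := bars.filter pvHasMusic
  ((bars1.filter (fun b => !(PySem.Chars.strip b).isEmpty)).map
    (fun b => String.ofList (PySem.Chars.strip b)))

-- ===== PORT A =====
-- A's while-loop over the character stream, with the in_quote flag and the
-- [2,1]-lookahead; current_bar is accumulated as the List Char its "".join yields.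
def aGo : List Char → Bool → List Char → List (List Char) → List (List Char)
  | [], _inq, cur, bars => pvRem cur bars
  | [c], inq, cur, bars =>
    if c = '"' then aGo [] (!inq) (cur ++ [c]) bars
    else if inq = false then
      if c = '|' then
        if cur ≠ [] then aGo [] inq [] (bars ++ [PySem.Chars.strip (cur ++ [c])])
        else aGo [] inq [c] bars
      else aGo [] inq (cur ++ [c]) bars
    else aGo [] inq (cur ++ [c]) bars
  | c :: d :: rest2, inq, cur, bars =>
    if c = '"' then aGo (d :: rest2) (!inq) (cur ++ [c]) bars
    else if inq = false then
      if pvDelim2 [c, d] then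
        if cur ≠ [] then aGo rest2 inq [] (bars ++ [PySem.Chars.strip (cur ++ [c, d])])
        else aGo rest2 inq [c, d] bars
      else if c = '|' then
        if cur ≠ [] then aGo (d :: rest2) inq [] (bars ++ [PySem.Chars.strip (cur ++ [c])])
        else aGo (d :: rest2) inq [c] bars
      else aGo (d :: rest2) inq (cur ++ [c]) bars
    else aGo (d :: rest2) inq (cur ++ [c]) bars
termination_by l _ _ _ => l.length
decreasing_by all_goals simp

def split_into_bars (text : String) : List String :=
  pvFinish (aGo text.toList false [] [])

-- ===== PORT B =====
-- _scan: split one unquoted segment, returning the completed bars and the leftover buffer.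
def bScan : List Char → List Char → List (List Char) × List Char
  | [], buf => ([], buf)
  | [c], buf =>
    if c = '|' then
      if buf ≠ [] then ([PySem.Chars.strip (buf ++ [c])], [])
      else ([], [c])
    else ([], buf ++ [c])
  | c :: d :: rest2, buf =>
    if pvDelim2 [c, d] then
      if buf ≠ [] then
        let p := bScan rest2 []
        (PySem.Chars.strip (buf ++ [c, d]) :: p.1, p.2)
      else bScan rest2 [c, d]
    else if c = '|' then
      if buf ≠ [] then
        let p := bScan (d :: rest2) []
        (PySem.Chars.strip (buf ++ [c]) :: p.1, p.2)
      else bScan (d :: rest2) [c]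
    else bScan (d :: rest2) (buf ++ [c])
termination_by l _ => l.length
decreasing_by all_goals simp

-- the for-loop over the remaining segments, alternating inside/outside quotes
def bGo : List (List Char) → Bool → List Char → List (List Char) → List (List Char) × List Char
  | [], _inside, buf, bars => (bars, buf)
  | seg :: segs, inside, buf, bars =>
    if inside then bGo segs (!inside) (buf ++ '"' :: seg) bars
    else
      let p := bScan seg (buf ++ ['"'])
      bGo segs (!inside) p.2 (bars ++ p.1)

def split_into_bars_alt (text : String) : List String :=
  match PySem.Chars.splitOn text.toList ['"'] with
  | [] => []   -- unreachable: str.split never returns an empty list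
  | first :: rest =>
    let p1 := bScan first []
    let p2 := bGo rest true p1.2 p1.1
    pvFinish (pvRem p2.2 p2.1)

-- ===== PRECONDITION & SPEC =====
def Spec_split_into_bars (text : String) (out : List String) : Prop := out = split_into_bars_alt text
instance (text : String) (out : List String) : Decidable (Spec_split_into_bars text out) := by unfold Spec_split_into_bars; infer_instance

-- ===== CLAIM (what is proved, stated in full; the proofs are below) =====
def Claim_equal_split_into_bars : Prop := ∀ (text : String), Dom_split_into_bars text → Spec_split_into_bars text (split_into_bars text)

-- ===== LEMMAS AND PROOFS =====

-- recursive characterisation of text.split('"')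
def pvQSplit : List Char → List (List Char)
  | [] => [[]]
  | c :: cs =>
    if c = '"' then [] :: pvQSplit cs
    else
      match pvQSplit cs with
      | s :: ss => (c :: s) :: ss
      | [] => [[c]]

lemma pvQSplit_ne_nil (cs : List Char) : pvQSplit cs ≠ [] := by
  cases cs with
  | nil => simp [pvQSplit]
  | cons c cs =>
    simp only [pvQSplit]
    split
    · simp
    · split <;> simp

lemma pvGoSpec : ∀ fuel (l cur : List Char) (acc : List (List Char)), l.length < fuel →
    PySem.Chars.splitOn.go ['"'] fuel l cur acc =
      acc.reverse ++
        (match pvQSplit l with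
         | s :: ss => (cur.reverse ++ s) :: ss
         | [] => [cur.reverse]) := by
  intro fuel
  induction fuel with
  | zero => intro l cur acc h; omega
  | succ f ih =>
    intro l cur acc h
    cases l with
    | nil => simp [PySem.Chars.splitOn.go, pvQSplit]
    | cons c rest =>
      rcases hq : pvQSplit rest with _ | ⟨s, ss⟩
      · exact absurd hq (pvQSplit_ne_nil rest)
      · by_cases hc : c = '"'
        · subst hc
          rw [PySem.Chars.splitOn.go]
          simp [List.isPrefixOf, ih rest [] (cur.reverse :: acc) (by simp at h; omega),
            pvQSplit, hq]
        · have hbc : ('"' == c) = false := by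
            simp only [beq_eq_false_iff_ne, ne_eq]
            exact fun hh => hc hh.symm
          rw [PySem.Chars.splitOn.go]
          simp [List.isPrefixOf, hbc, ih rest (c :: cur) acc (by simp at h; omega),
            pvQSplit, hc, hq]

lemma pvSplitOn_eq (cs : List Char) :
    PySem.Chars.splitOn cs ['"'] = pvQSplit cs := by
  rw [PySem.Chars.splitOn, pvGoSpec (cs.length + 1) cs [] [] (by omega)]
  rcases hq : pvQSplit cs with _ | ⟨s, ss⟩
  · exact absurd hq (pvQSplit_ne_nil cs)
  · simp

lemma pvQSplit_shape : ∀ (cs s : List Char) (ss : List (List Char)),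
    pvQSplit cs = s :: ss →
      (∀ t ∈ s :: ss, '"' ∉ t) ∧ cs = s ++ ss.flatMap (fun t => '"' :: t) := by
  intro cs
  induction cs with
  | nil =>
    intro s ss h
    simp only [pvQSplit] at h
    cases h
    simp
  | cons c cs ih =>
    intro s ss h
    rcases hq : pvQSplit cs with _ | ⟨s', ss'⟩
    · exact absurd hq (pvQSplit_ne_nil cs)
    · obtain ⟨hfree, hdec⟩ := ih s' ss' hq
      by_cases hc : c = '"'
      · subst hc
        simp only [pvQSplit, hq] at h
        cases h
        constructor
        · intro t ht
          rcases List.mem_cons.mp ht with h1 | h1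
          · simp [h1]
          · exact hfree t h1
        · simp [hdec]
      · simp only [pvQSplit, if_neg hc, hq] at h
        cases h
        constructor
        · intro t ht
          rcases List.mem_cons.mp ht with h1 | h1
          · subst h1
            intro hmem
            rcases List.mem_cons.mp hmem with h2 | h2
            · exact hc h2.symm
            · exact hfree s' (List.mem_cons_self ..) h2
          · exact hfree t (List.mem_cons_of_mem _ h1)
        · simp [hdec]

lemma pvA2 : ∀ (seg rest buf : List Char) (bars : List (List Char)),
    '"' ∉ seg → aGo (seg ++ rest) true buf bars = aGo rest true (buf ++ seg) bars := by
  intro seg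
  induction seg with
  | nil => intro rest buf bars _; simp
  | cons c seg ih =>
    intro rest buf bars hfree
    have hc : ¬ c = '"' := by intro h; exact hfree (h ▸ List.mem_cons_self ..)
    have hs : '"' ∉ seg := fun h => hfree (List.mem_cons_of_mem _ h)
    have step : aGo (c :: (seg ++ rest)) true buf bars = aGo (seg ++ rest) true (buf ++ [c]) bars := by
      rcases e : seg ++ rest with _ | ⟨d, r2⟩ <;> simp [aGo, hc]
    rw [List.cons_append, step, ih rest (buf ++ [c]) bars hs]
    simp

lemma pvDelim2_quote (c : Char) : pvDelim2 [c, '"'] = false := by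
  simp [pvDelim2]

lemma pvA1 : ∀ (n : Nat) (seg : List Char), seg.length ≤ n → '"' ∉ seg →
    ∀ (rest : List Char), (rest = [] ∨ ∃ r, rest = '"' :: r) →
    ∀ (buf : List Char) (bars : List (List Char)),
      aGo (seg ++ rest) false buf bars =
        aGo rest false (bScan seg buf).2 (bars ++ (bScan seg buf).1) := by
  intro n
  induction n with
  | zero =>
    intro seg hlen _ rest _ buf bars
    have : seg = [] := List.eq_nil_of_length_eq_zero (by omega)
    subst this
    simp [bScan]
  | succ m ih =>
    intro seg hlen hfree rest hrest buf bars
    match seg, hlen, hfree with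
    | [], _, _ => simp [bScan]
    | [c], _, hfree =>
      have hc : ¬ c = '"' := by intro h; exact hfree (h ▸ List.mem_cons_self ..)
      rcases hrest with h | ⟨r, h⟩ <;> subst h
      · by_cases hp : c = '|'
        · subst hp
          by_cases hb : buf = []
          · subst hb; simp [aGo, bScan]
          · simp [aGo, bScan, hb]
        · simp [aGo, bScan, hc, hp]
      · by_cases hp : c = '|'
        · subst hp
          by_cases hb : buf = []
          · subst hb; simp [aGo, bScan, pvDelim2]
          · simp [aGo, bScan, pvDelim2, hb]
        · simp [aGo, bScan, hc, hp, pvDelim2_quote]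
    | c :: d :: seg2, hlen, hfree =>
      have hc : ¬ c = '"' := by intro h; exact hfree (h ▸ List.mem_cons_self ..)
      have hd : ¬ d = '"' := by
        intro h; exact hfree (h ▸ List.mem_cons_of_mem _ (List.mem_cons_self ..))
      have hs2 : '"' ∉ seg2 := fun h =>
        hfree (List.mem_cons_of_mem _ (List.mem_cons_of_mem _ h))
      have hds2 : '"' ∉ d :: seg2 := fun h => hfree (List.mem_cons_of_mem _ h)
      have hlen2 : seg2.length ≤ m := by simp at hlen; omega
      have hlen1 : (d :: seg2).length ≤ m := by simp at hlen ⊢; omega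
      by_cases hdl : pvDelim2 [c, d] = true
      · by_cases hb : buf = []
        · subst hb
          have step : aGo (c :: d :: (seg2 ++ rest)) false [] bars =
              aGo (seg2 ++ rest) false [c, d] bars := by
            simp [aGo, hc, hdl]
          rw [List.cons_append, List.cons_append, step,
            ih seg2 hlen2 hs2 rest hrest [c, d] bars]
          simp [bScan, hdl]
        · have step : aGo (c :: d :: (seg2 ++ rest)) false buf bars =
              aGo (seg2 ++ rest) false []
                (bars ++ [PySem.Chars.strip (buf ++ [c, d])]) := by
            simp [aGo, hc, hdl, hb]
          rw [List.cons_append, List.cons_append, step,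
            ih seg2 hlen2 hs2 rest hrest [] (bars ++ [PySem.Chars.strip (buf ++ [c, d])])]
          simp [bScan, hdl, hb]
      · by_cases hp : c = '|'
        · subst hp
          by_cases hb : buf = []
          · subst hb
            have step : aGo ('|' :: d :: (seg2 ++ rest)) false [] bars =
                aGo (d :: seg2 ++ rest) false ['|'] bars := by
              simp [aGo, hdl]
            rw [List.cons_append, List.cons_append, step,
              ih (d :: seg2) hlen1 hds2 rest hrest ['|'] bars]
            simp [bScan, hdl]
          · have step : aGo ('|' :: d :: (seg2 ++ rest)) false buf bars =
                aGo (d :: seg2 ++ rest) false []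
                  (bars ++ [PySem.Chars.strip (buf ++ ['|'])]) := by
              simp [aGo, hdl, hb]
            rw [List.cons_append, List.cons_append, step,
              ih (d :: seg2) hlen1 hds2 rest hrest []
                (bars ++ [PySem.Chars.strip (buf ++ ['|'])])]
            simp [bScan, hdl, hb]
        · have step : aGo (c :: d :: (seg2 ++ rest)) false buf bars =
              aGo (d :: seg2 ++ rest) false (buf ++ [c]) bars := by
            simp [aGo, hc, hdl, hp]
          rw [List.cons_append, List.cons_append, step,
            ih (d :: seg2) hlen1 hds2 rest hrest (buf ++ [c]) bars]
          simp [bScan, hdl, hp]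

lemma pvM : ∀ (segs : List (List Char)), (∀ s ∈ segs, '"' ∉ s) →
    ∀ (inside : Bool) (buf : List Char) (bars : List (List Char)),
      aGo (segs.flatMap (fun s => '"' :: s)) (!inside) buf bars =
        pvRem (bGo segs inside buf bars).2 (bGo segs inside buf bars).1 := by
  intro segs
  induction segs with
  | nil => intro _ inside buf bars; simp [aGo, bGo]
  | cons seg segs ih =>
    intro hfree inside buf bars
    have hseg : '"' ∉ seg := hfree seg (List.mem_cons_self ..)
    have hsegs : ∀ s ∈ segs, '"' ∉ s := fun s hs => hfree s (List.mem_cons_of_mem _ hs)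
    have step : aGo ('"' :: (seg ++ segs.flatMap (fun s => '"' :: s))) (!inside) buf bars =
        aGo (seg ++ segs.flatMap (fun s => '"' :: s)) inside (buf ++ ['"']) bars := by
      rcases e : seg ++ segs.flatMap (fun s => '"' :: s) with _ | ⟨d, r2⟩ <;>
        simp [aGo, Bool.not_not]
    rw [List.flatMap_cons, List.cons_append, step]
    cases inside with
    | true =>
      rw [pvA2 seg _ (buf ++ ['"']) bars hseg]
      have := ih hsegs false (buf ++ ['"'] ++ seg) bars
      simp only [Bool.not_false] at this
      rw [this]
      simp [bGo]
    | false =>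
      have hrest : segs.flatMap (fun s => '"' :: s) = [] ∨
          ∃ r, segs.flatMap (fun s => '"' :: s) = '"' :: r := by
        cases segs with
        | nil => exact Or.inl rfl
        | cons s ss => exact Or.inr ⟨s ++ ss.flatMap (fun t => '"' :: t), by simp⟩
      rw [pvA1 seg.length seg le_rfl hseg _ hrest (buf ++ ['"']) bars]
      have := ih hsegs true (bScan seg (buf ++ ['"'])).2 (bars ++ (bScan seg (buf ++ ['"'])).1)
      simp only [Bool.not_true] at this
      rw [this]
      simp [bGo]

-- ===== VERDICT (by name: the statement is the Claim_ definition above) =====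
theorem split_into_bars_spec : Claim_equal_split_into_bars := by
  intro text _dom
  unfold Spec_split_into_bars split_into_bars split_into_bars_alt
  rcases h : pvQSplit text.toList with _ | ⟨first, rest⟩
  · exact absurd h (pvQSplit_ne_nil _)
  · obtain ⟨hfree, hdec⟩ := pvQSplit_shape _ _ _ h
    have h1 : '"' ∉ first := hfree first (List.mem_cons_self ..)
    have h2 : ∀ s ∈ rest, '"' ∉ s := fun s hs => hfree s (List.mem_cons_of_mem _ hs)
    rw [pvSplitOn_eq, h]
    have hrest : rest.flatMap (fun t => '"' :: t) = [] ∨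
        ∃ r, rest.flatMap (fun t => '"' :: t) = '"' :: r := by
      cases rest with
      | nil => exact Or.inl rfl
      | cons s ss => exact Or.inr ⟨s ++ ss.flatMap (fun t => '"' :: t), by simp⟩
    have hA := pvA1 first.length first le_rfl h1 _ hrest [] []
    rw [hdec, hA]
    have hM := pvM rest h2 true (bScan first []).2 ([] ++ (bScan first []).1)
    simp only [Bool.not_true, List.nil_append] at hM ⊢
    rw [hM]
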